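-- pv_equiv track=rewrite | github.com/tobywynne-mellor/Ethereum-Big-Data | scripts/top_ten_MapReduce_b.py | reducer_repartition_join
-- ===== SOURCE A (Python) =====
-- def reducer_repartition_join(address, values):
-- 	# {"contract": count, "transaction": total_value}
-- 	contracts_and_transactions = {}
--
-- 	for value in values:
-- 		if not value[1] > 0:
-- 			continue
--
-- 		if value[0] in contracts_and_transactions:
-- 			contracts_and_transactions[value[0]] += value[1]
-- 		else:
-- 			contracts_and_transactions[value[0]] = value[1]
--
-- 	# check that both transactions and contracts are present in value array
-- 	if "transaction" in contracts_and_transactions: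
-- 		if "contract" in contracts_and_transactions:
-- 			yield(address, contracts_and_transactions["transaction"])
-- ===== SOURCE B (Python) =====
-- def reducer_repartition_join(address, values):
--     # Staged passes: materialize the positive entries once, then decide
--     # presence via a set of kinds, then sum the transaction values.
--     positives = [(k, v) for k, v in values if v > 0]
--     kinds = set(k for k, _ in positives)
--     if "transaction" in kinds and "contract" in kinds:
--         yield (address, sum(v for k, v in positives if k == "transaction"))
-- ===== Notes on version B (the rewrite author's own statement) =====
-- stated objective: simpler
-- what changed: Replaces A's single pass that aggregates every key into a dict by staged passes: filter the positive entries once, build a set of the kinds present, and sum the transaction values in a comprehension only when both kinds are in the set.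
import Mathlib
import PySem

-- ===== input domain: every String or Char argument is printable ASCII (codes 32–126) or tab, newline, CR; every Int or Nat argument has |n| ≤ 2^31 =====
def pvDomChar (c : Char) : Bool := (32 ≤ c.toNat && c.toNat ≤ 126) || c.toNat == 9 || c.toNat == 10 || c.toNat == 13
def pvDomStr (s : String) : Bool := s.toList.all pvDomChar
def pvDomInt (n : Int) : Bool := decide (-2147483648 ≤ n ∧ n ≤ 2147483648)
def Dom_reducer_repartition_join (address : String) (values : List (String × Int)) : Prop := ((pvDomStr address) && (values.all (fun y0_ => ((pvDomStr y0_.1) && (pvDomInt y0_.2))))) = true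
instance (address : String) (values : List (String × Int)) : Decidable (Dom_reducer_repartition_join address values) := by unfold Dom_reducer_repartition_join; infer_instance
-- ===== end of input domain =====

-- B replaces A's single accumulating pass over a per-key dict by staged passes (filter the positive entries, set of kinds, sum): simpler, same output.

-- ===== PORT A =====
-- loop body of A, kept as a helper
def pvStepA (d : PySem.Dict String Int) (v : String × Int) : PySem.Dict String Int :=
  if ¬ v.2 > 0 then d
  else if d.contains v.1 then d.insert v.1 (d.getD v.1 0 + v.2)
  else d.insert v.1 v.2

def reducer_repartition_join (address : String) (values : List (String × Int)) : List (String × Int) :=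
  let d := values.foldl pvStepA PySem.Dict.empty
  if d.contains "transaction" then
    if d.contains "contract" then [(address, d.getD "transaction" 0)]
    else []
  else []

-- ===== PORT B =====
def reducer_repartition_join_alt (address : String) (values : List (String × Int)) : List (String × Int) :=
  let positives := values.filter (fun v => v.2 > 0)
  let kinds : PySem.Set String := PySem.Set.ofList (positives.map Prod.fst)
  if kinds.contains "transaction" && kinds.contains "contract" then
    [(address, ((positives.filter (fun v => v.1 == "transaction")).map Prod.snd).sum)]
  else []

-- ===== PRECONDITION & SPEC =====
def Spec_reducer_repartition_join (address : String) (values : List (String × Int)) (out : List (String × Int)) : Prop := out = reducer_repartition_join_alt address values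
instance (address : String) (values : List (String × Int)) (out : List (String × Int)) : Decidable (Spec_reducer_repartition_join address values out) := by unfold Spec_reducer_repartition_join; infer_instance

-- ===== CLAIM =====
def Claim_equal_reducer_repartition_join : Prop := ∀ (address : String) (values : List (String × Int)), Dom_reducer_repartition_join address values → Spec_reducer_repartition_join address values (reducer_repartition_join address values)

-- ===== LEMMAS AND PROOFS =====

-- A's loop body, when the value is positive, is a single insert with the summed value
theorem pvStepA_pos (d : PySem.Dict String Int) (v : String × Int) (h : 0 < v.2) :
    pvStepA d v = d.insert v.1 (d.getD v.1 0 + v.2) := by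
  by_cases hc : d.contains v.1 = true
  · simp [pvStepA, h, hc]
  · have h0 : d.getD v.1 0 = 0 :=
      PySem.Dict.getD_of_not_contains d 0 (by simpa using hc)
    simp [pvStepA, h, hc, h0]

-- the dict built by A's loop contains k iff some positive entry carries kind k
theorem pv_contains (k : String) : ∀ (values : List (String × Int)) (d : PySem.Dict String Int),
    (values.foldl pvStepA d).contains k =
      (d.contains k || (values.filter (fun v => v.2 > 0)).any (fun v => v.1 == k))
  | [], d => by simp
  | (a, x) :: rest, d => by
    by_cases hx : (0 : Int) < x
    · have := pvStepA_pos d (a, x) hx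
      simp only [List.foldl_cons, this, pv_contains k rest,
        PySem.Dict.contains_insert, List.filter_cons]
      by_cases hk : k = a
      · simp [hk, hx]
      · have e1 : (k == a) = false := beq_eq_false_iff_ne.mpr hk
        have e2 : (a == k) = false := beq_eq_false_iff_ne.mpr (Ne.symm hk)
        simp [hx, e1, e2]
    · simp [pvStepA, hx, pv_contains k rest]

-- the dict's "transaction" entry is the sum of the positive transaction values
theorem pv_sum : ∀ (values : List (String × Int)) (d : PySem.Dict String Int),
    (values.foldl pvStepA d).getD "transaction" 0 =
      d.getD "transaction" 0 +
        (((values.filter (fun v => v.2 > 0)).filter (fun v => v.1 == "transaction")).map Prod.snd).sum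
  | [], d => by simp
  | (a, x) :: rest, d => by
    by_cases hx : (0 : Int) < x
    · have hs := pvStepA_pos d (a, x) hx
      simp only [List.foldl_cons, hs, pv_sum rest, List.filter_cons]
      by_cases ha : a = "transaction"
      · simp [ha, hx]; ring
      · simp [ha, hx, PySem.Dict.getD_insert, Ne.symm ha]

    · simp [pvStepA, hx, pv_sum rest]

-- B's set membership agrees with the any-scan over the positive entries
theorem pv_set_contains (k : String) (positives : List (String × Int)) :
    (PySem.Set.ofList (positives.map Prod.fst)).contains k =
      positives.any (fun v => v.1 == k) := by
  rw [Bool.eq_iff_iff]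
  simp [PySem.Set.mem_ofList, List.any_eq_true, List.mem_map]

-- ===== VERDICT =====
theorem reducer_repartition_join_spec : Claim_equal_reducer_repartition_join := by
  intro address values _
  unfold Spec_reducer_repartition_join reducer_repartition_join reducer_repartition_join_alt
  simp only [pv_contains, pv_sum, pv_set_contains,
    PySem.Dict.contains_empty, PySem.Dict.getD_empty, Bool.false_or, zero_add]
  cases (values.filter (fun v => v.2 > 0)).any (fun v => v.1 == "transaction") <;>
    cases (values.filter (fun v => v.2 > 0)).any (fun v => v.1 == "contract") <;> simp
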